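-- pv_equiv track=rewrite | github.com/Afia-Zaman/Project-7_X-Y_-_Xena | Project07_Afia_Zaman.py | draw_y
-- ===== SOURCE A (Python) =====
-- def draw_y(symbol, size):
--     bounds = size * 2 + 1
--     y = ""
--     for row in range(size + 1):
--         for col in range(bounds):
--             if row == col or col == bounds - row - 1:
--                 y += symbol
--             else:
--                 y += " "
--         y += "\n"
--     for row in range(size):
--         y += " " * size + symbol + "\n"
--     return y
-- ===== SOURCE B (Python) =====
-- def draw_y(symbol, size):
--     bounds = size * 2 + 1
--     lines = [" " * r + symbol + " " * (bounds - 2 * r - 2) + symbol + " " * r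
--              for r in range(size)]
--     lines.append(" " * size + symbol + " " * size)
--     lines += [" " * size + symbol] * size
--     return "".join(line + "\n" for line in lines)
-- ===== Notes on version B (the rewrite author's own statement) =====
-- stated objective: simpler
-- what changed: B builds each line directly from its row index (left pad + symbol + gap + symbol + pad, then the middle line and the stem lines) and joins them, instead of A's per-cell nested loop testing every column; Pre_ excludes negative sizes, which lie outside the natural domain of an ASCII-art size and on which A's empty-string output is an accident of its empty ranges.
-- outside the precondition, e.g. on draw_y('*', -1): A returns '', B returns '*\n'
import Mathlib
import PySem

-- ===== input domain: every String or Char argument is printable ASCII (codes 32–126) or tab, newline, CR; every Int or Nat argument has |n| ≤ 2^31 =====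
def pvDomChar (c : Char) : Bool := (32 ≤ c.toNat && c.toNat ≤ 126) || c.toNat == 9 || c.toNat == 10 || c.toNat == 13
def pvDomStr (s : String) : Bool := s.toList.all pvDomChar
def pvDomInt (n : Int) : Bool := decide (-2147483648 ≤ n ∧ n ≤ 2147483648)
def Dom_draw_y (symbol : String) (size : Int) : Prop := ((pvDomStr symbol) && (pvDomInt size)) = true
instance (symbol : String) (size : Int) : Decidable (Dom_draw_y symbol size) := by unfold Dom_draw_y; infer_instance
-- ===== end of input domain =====

-- B builds each line directly (left pad, symbol, gap, symbol, then the middle and stem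
-- lines) instead of A's per-cell column scan with an if at every cell: simpler decomposition.
-- Strings are represented as List Char internally (PySem-exact; String.ofList at the end).

-- ===== PORT A =====
def draw_y (symbol : String) (size : Int) : String :=
  let bounds := size * 2 + 1
  let y : List Char :=
    (PySem.List.pyRange 0 (size + 1) 1).foldl (fun y row =>
      ((PySem.List.pyRange 0 bounds 1).foldl (fun y col =>
        if row == col || col == bounds - row - 1 then y ++ symbol.toList
        else y ++ [' ']) y) ++ ['\n']) []
  let y :=
    (PySem.List.pyRange 0 size 1).foldl (fun y _ =>
      y ++ PySem.List.pyRepeat [' '] size ++ symbol.toList ++ ['\n']) y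
  String.ofList y

-- ===== PORT B =====
def draw_y_alt (symbol : String) (size : Int) : String :=
  let bounds := size * 2 + 1
  let lines : List (List Char) :=
    (PySem.List.pyRange 0 size 1).map (fun r =>
      PySem.List.pyRepeat [' '] r ++ symbol.toList
        ++ PySem.List.pyRepeat [' '] (bounds - 2 * r - 2) ++ symbol.toList
        ++ PySem.List.pyRepeat [' '] r)
  let lines := lines
    ++ [PySem.List.pyRepeat [' '] size ++ symbol.toList ++ PySem.List.pyRepeat [' '] size]
  let lines := lines ++ PySem.List.pyRepeat [PySem.List.pyRepeat [' '] size ++ symbol.toList] size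
  String.ofList ((lines.map (· ++ ['\n'])).flatten)

-- ===== PRECONDITION & SPEC =====
-- Pre_ excludes negative sizes: they are outside the natural domain of an ASCII-art size,
-- and A's empty-string output there is an accident of its empty ranges.
def Pre_draw_y (symbol : String) (size : Int) : Prop := 0 ≤ size
instance (symbol : String) (size : Int) : Decidable (Pre_draw_y symbol size) := by unfold Pre_draw_y; infer_instance
def pvWitness_draw_y : String × Int := ("*", 2)
def Spec_draw_y (symbol : String) (size : Int) (out : String) : Prop := out = draw_y_alt symbol size
instance (symbol : String) (size : Int) (out : String) : Decidable (Spec_draw_y symbol size out) := by unfold Spec_draw_y; infer_instance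

-- ===== CLAIM (what is proved, stated in full; the proofs are below) =====
def Claim_equal_draw_y : Prop := ∀ (symbol : String) (size : Int), Dom_draw_y symbol size → Pre_draw_y symbol size → Spec_draw_y symbol size (draw_y symbol size)

-- ===== LEMMAS AND PROOFS =====

-- the per-cell content of A's inner column loop, for top row r
def cellF (S : List Char) (size r : Int) : Int → List Char :=
  fun col => if r == col || col == size * 2 + 1 - r - 1 then S else [' ']

theorem flatten_replicate_singleton (n : Nat) (c : Char) :
    (List.replicate n [c]).flatten = List.replicate n c := by
  induction n with
  | zero => simp
  | succ k ih => simp [List.replicate_succ, ih]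

theorem spaces_block (f : Int → List Char) (a b : Int)
    (hf : ∀ col ∈ PySem.List.pyRange a b 1, f col = [' ']) :
    (PySem.List.pyRange a b 1).flatMap f = List.replicate (b - a).toNat ' ' := by
  rw [List.flatMap_def, List.map_congr_left hf, List.map_const',
    flatten_replicate_singleton, PySem.List.length_pyRange_one]

theorem foldl_if_append (S : List Char) (cond : Int → Bool) (l : List Int) (y : List Char) :
    l.foldl (fun y col => if cond col then y ++ S else y ++ [' ']) y
      = y ++ l.flatMap (fun col => if cond col then S else [' ']) := by
  have h : (fun (y : List Char) col => if cond col then y ++ S else y ++ [' '])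
      = fun y col => y ++ (if cond col then S else [' ']) := by
    funext y c; split <;> rfl
  rw [h, PySem.List.foldl_append_eq_flatMap]

theorem cells_lt (S : List Char) (size r : Int) (h0 : 0 ≤ r) (hr : r < size) :
    (PySem.List.pyRange 0 (size * 2 + 1) 1).flatMap (cellF S size r)
      = List.replicate r.toNat ' ' ++ S
          ++ List.replicate (size * 2 + 1 - 2 * r - 2).toNat ' ' ++ S
          ++ List.replicate r.toNat ' ' := by
  have hsplit : PySem.List.pyRange 0 (size * 2 + 1) 1
      = PySem.List.pyRange 0 r 1 ++ PySem.List.pyRange r (r + 1) 1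
        ++ PySem.List.pyRange (r + 1) (size * 2 + 1 - r - 1) 1
        ++ PySem.List.pyRange (size * 2 + 1 - r - 1) (size * 2 + 1 - r) 1
        ++ PySem.List.pyRange (size * 2 + 1 - r) (size * 2 + 1) 1 := by
    rw [PySem.List.pyRange_one_append 0 r (size * 2 + 1) h0 (by omega),
      PySem.List.pyRange_one_append r (r + 1) (size * 2 + 1) (by omega) (by omega),
      PySem.List.pyRange_one_append (r + 1) (size * 2 + 1 - r - 1) (size * 2 + 1) (by omega) (by omega),
      PySem.List.pyRange_one_append (size * 2 + 1 - r - 1) (size * 2 + 1 - r) (size * 2 + 1) (by omega) (by omega)]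
    simp [List.append_assoc]
  have h1 : (PySem.List.pyRange 0 r 1).flatMap (cellF S size r)
      = List.replicate r.toNat ' ' := by
    have := spaces_block (cellF S size r) 0 r (fun col hc => by
      rw [PySem.List.mem_pyRange_one] at hc
      have hb : (r == col || col == size * 2 + 1 - r - 1) = false := by
        simp only [Bool.or_eq_false_iff, beq_eq_false_iff_ne, ne_eq]
        omega
      simp [cellF, hb])
    simpa using this
  have h2 : (PySem.List.pyRange r (r + 1) 1).flatMap (cellF S size r) = S := by
    rw [PySem.List.pyRange_one_singleton]
    simp [cellF]
  have h3 : (PySem.List.pyRange (r + 1) (size * 2 + 1 - r - 1) 1).flatMap (cellF S size r)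
      = List.replicate (size * 2 + 1 - 2 * r - 2).toNat ' ' := by
    have := spaces_block (cellF S size r) (r + 1) (size * 2 + 1 - r - 1) (fun col hc => by
      rw [PySem.List.mem_pyRange_one] at hc
      have hb : (r == col || col == size * 2 + 1 - r - 1) = false := by
        simp only [Bool.or_eq_false_iff, beq_eq_false_iff_ne, ne_eq]
        omega
      simp [cellF, hb])
    rw [this]; congr 1; omega
  have h4 : (PySem.List.pyRange (size * 2 + 1 - r - 1) (size * 2 + 1 - r) 1).flatMap (cellF S size r) = S := by
    have hsing : PySem.List.pyRange (size * 2 + 1 - r - 1) (size * 2 + 1 - r) 1 = [size * 2 + 1 - r - 1] := by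
      have h := PySem.List.pyRange_one_singleton (size * 2 + 1 - r - 1)
      rw [show (size * 2 + 1 - r - 1) + 1 = size * 2 + 1 - r from by omega] at h
      exact h
    rw [hsing]
    simp [cellF]
  have h5 : (PySem.List.pyRange (size * 2 + 1 - r) (size * 2 + 1) 1).flatMap (cellF S size r)
      = List.replicate r.toNat ' ' := by
    have := spaces_block (cellF S size r) (size * 2 + 1 - r) (size * 2 + 1) (fun col hc => by
      rw [PySem.List.mem_pyRange_one] at hc
      have hb : (r == col || col == size * 2 + 1 - r - 1) = false := by
        simp only [Bool.or_eq_false_iff, beq_eq_false_iff_ne, ne_eq]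
        omega
      simp [cellF, hb])
    rw [this]; congr 1; omega
  rw [hsplit]
  simp only [List.flatMap_append, h1, h2, h3, h4, h5, List.append_assoc]

theorem cells_eq (S : List Char) (size : Int) (h0 : 0 ≤ size) :
    (PySem.List.pyRange 0 (size * 2 + 1) 1).flatMap (cellF S size size)
      = List.replicate size.toNat ' ' ++ S ++ List.replicate size.toNat ' ' := by
  have hsplit : PySem.List.pyRange 0 (size * 2 + 1) 1
      = PySem.List.pyRange 0 size 1 ++ PySem.List.pyRange size (size + 1) 1
        ++ PySem.List.pyRange (size + 1) (size * 2 + 1) 1 := by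
    rw [PySem.List.pyRange_one_append 0 size (size * 2 + 1) h0 (by omega),
      PySem.List.pyRange_one_append size (size + 1) (size * 2 + 1) (by omega) (by omega)]
    simp [List.append_assoc]
  have h1 : (PySem.List.pyRange 0 size 1).flatMap (cellF S size size)
      = List.replicate size.toNat ' ' := by
    have := spaces_block (cellF S size size) 0 size (fun col hc => by
      rw [PySem.List.mem_pyRange_one] at hc
      have hb : (size == col || col == size * 2 + 1 - size - 1) = false := by
        simp only [Bool.or_eq_false_iff, beq_eq_false_iff_ne, ne_eq]
        omega
      simp [cellF, hb])
    simpa using this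
  have h2 : (PySem.List.pyRange size (size + 1) 1).flatMap (cellF S size size) = S := by
    rw [PySem.List.pyRange_one_singleton]
    simp [cellF]
  have h3 : (PySem.List.pyRange (size + 1) (size * 2 + 1) 1).flatMap (cellF S size size)
      = List.replicate size.toNat ' ' := by
    have := spaces_block (cellF S size size) (size + 1) (size * 2 + 1) (fun col hc => by
      rw [PySem.List.mem_pyRange_one] at hc
      have hb : (size == col || col == size * 2 + 1 - size - 1) = false := by
        simp only [Bool.or_eq_false_iff, beq_eq_false_iff_ne, ne_eq]
        omega
      simp [cellF, hb])
    rw [this]; congr 1; omega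
  rw [hsplit]
  simp only [List.flatMap_append, h1, h2, h3, List.append_assoc]

-- ===== VERDICT (by name: the statement is the Claim_ definition above) =====
theorem draw_y_spec : Claim_equal_draw_y := by
  intro symbol size _ hpre
  have hneg : (0 : Int) ≤ size := hpre
  unfold Spec_draw_y
  simp only [draw_y, draw_y_alt]
  refine congrArg String.ofList ?_
  set S := symbol.toList with hS
  -- A's outer loop as a flatMap of rows, stem loop as a flatMap
  have hinner : ∀ (y : List Char) (row : Int),
      (PySem.List.pyRange 0 (size * 2 + 1) 1).foldl
        (fun y col => if row == col || col == size * 2 + 1 - row - 1 then y ++ S else y ++ [' ']) y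
        = y ++ (PySem.List.pyRange 0 (size * 2 + 1) 1).flatMap (cellF S size row) := by
    intro y row
    exact foldl_if_append S (fun col => row == col || col == size * 2 + 1 - row - 1) _ y
  have houter : (fun (y : List Char) row =>
        ((PySem.List.pyRange 0 (size * 2 + 1) 1).foldl
          (fun y col => if row == col || col == size * 2 + 1 - row - 1 then y ++ S else y ++ [' ']) y) ++ ['\n'])
      = fun y row => y ++ ((PySem.List.pyRange 0 (size * 2 + 1) 1).flatMap (cellF S size row) ++ ['\n']) := by
    funext y row
    rw [hinner]; simp [List.append_assoc]
  have hstemf : (fun (y : List Char) (_ : Int) =>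
        y ++ PySem.List.pyRepeat [' '] size ++ S ++ ['\n'])
      = fun y _ => y ++ (PySem.List.pyRepeat [' '] size ++ S ++ ['\n']) := by
    funext y c; simp [List.append_assoc]
  rw [houter, hstemf, PySem.List.foldl_append_eq_flatMap, PySem.List.foldl_append_eq_flatMap]
  -- split the top rows into 0..size-1 and the middle row
  have hrows : PySem.List.pyRange 0 (size + 1) 1
      = PySem.List.pyRange 0 size 1 ++ [size] := PySem.List.pyRange_one_succ_right hneg
  rw [hrows, List.flatMap_append]
  have htop : (PySem.List.pyRange 0 size 1).flatMap
        (fun row => (PySem.List.pyRange 0 (size * 2 + 1) 1).flatMap (cellF S size row) ++ ['\n'])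
      = (PySem.List.pyRange 0 size 1).flatMap (fun r =>
          (PySem.List.pyRepeat [' '] r ++ S ++ PySem.List.pyRepeat [' '] (size * 2 + 1 - 2 * r - 2)
            ++ S ++ PySem.List.pyRepeat [' '] r) ++ ['\n']) := by
    rw [List.flatMap_def, List.flatMap_def]
    congr 1
    apply List.map_congr_left
    intro r hr
    rw [PySem.List.mem_pyRange_one] at hr
    rw [cells_lt S size r hr.1 hr.2]
    simp [PySem.List.pyRepeat_singleton, List.append_assoc]
  have hmid : (List.flatMap
        (fun row => (PySem.List.pyRange 0 (size * 2 + 1) 1).flatMap (cellF S size row) ++ ['\n']) [size])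
      = (List.replicate size.toNat ' ' ++ S ++ List.replicate size.toNat ' ') ++ ['\n'] := by
    simp only [List.flatMap_cons, List.flatMap_nil, List.append_nil]
    rw [cells_eq S size hneg]
  have hstem : (PySem.List.pyRange 0 size 1).flatMap
        (fun _ => PySem.List.pyRepeat [' '] size ++ S ++ ['\n'])
      = (List.replicate size.toNat ((PySem.List.pyRepeat [' '] size ++ S) ++ ['\n'])).flatten := by
    rw [List.flatMap_def, List.map_const', PySem.List.length_pyRange_one,
      show ((size : Int) - 0).toNat = size.toNat from by omega,
      show PySem.List.pyRepeat [' '] size ++ S ++ ['\n']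
        = (PySem.List.pyRepeat [' '] size ++ S) ++ ['\n'] from by simp [List.append_assoc]]
  rw [htop, hmid, hstem]
  -- now massage B's side into the same shape
  simp only [List.map_append, List.map_map, List.flatten_append,
    PySem.List.pyRepeat_singleton, List.map_replicate]
  rw [List.flatMap_def]
  simp [Function.comp_def, List.append_assoc]
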